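-- pv_equiv track=rewrite | github.com/Dasmitrich/PythonLabs | lab1/num3.py | f13
-- ===== SOURCE A (Python) =====
-- def f13(n, m):
--
--     part_a = 0
--     for i in range(1, n+1):
--         part_a += 32 * i ** 8 + i ** 6
--
--     part_b = 0
--     for i in range(1, n+1):
--         for j in range(1, m+1):
--             part_b += 49 * j ** 4 + i ** 2
--
--     return part_a - part_b
-- ===== SOURCE B (Python) =====
-- def f13(n, m):
--     # Closed form: both sums are polynomial power sums over their trip counts.
--     N = len(range(1, n + 1))
--     M = len(range(1, m + 1))
--     s2 = N * (N + 1) * (2 * N + 1) // 6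
--     s4 = M * (M + 1) * (2 * M + 1) * (3 * M * M + 3 * M - 1) // 30
--     s6 = N * (N + 1) * (2 * N + 1) * (3 * N ** 4 + 6 * N ** 3 - 3 * N + 1) // 42
--     s8 = N * (N + 1) * (2 * N + 1) * (5 * N ** 6 + 15 * N ** 5 + 5 * N ** 4 - 15 * N ** 3 - N * N + 9 * N - 3) // 90
--     return 32 * s8 + s6 - (49 * N * s4 + M * s2)
-- ===== Notes on version B (the rewrite author's own statement) =====
-- stated objective: faster
-- what changed: Replaces A's O(n*m) double loop by closed-form Faulhaber power-sum formulas over the two loop trip counts, so B is a constant number of arithmetic operations.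
import Mathlib
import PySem

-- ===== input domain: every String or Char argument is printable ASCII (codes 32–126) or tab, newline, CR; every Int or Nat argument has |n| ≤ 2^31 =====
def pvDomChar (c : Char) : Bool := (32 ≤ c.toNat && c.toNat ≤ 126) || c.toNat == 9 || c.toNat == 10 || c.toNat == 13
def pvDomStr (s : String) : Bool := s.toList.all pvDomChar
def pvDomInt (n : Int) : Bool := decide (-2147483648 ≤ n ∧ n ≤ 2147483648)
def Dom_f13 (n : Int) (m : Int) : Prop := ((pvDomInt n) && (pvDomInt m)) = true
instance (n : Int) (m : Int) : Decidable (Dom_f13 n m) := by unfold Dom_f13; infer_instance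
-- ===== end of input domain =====

-- B replaces A's double loop by closed-form Faulhaber power-sum formulas over the loop trip counts (faster, asymptotic).

-- ===== PORT A =====
def f13 (n : Int) (m : Int) : Int :=
  let part_a := (PySem.List.pyRange 1 (n+1) 1).foldl (fun acc i => acc + (32 * i ^ 8 + i ^ 6)) 0
  let part_b := (PySem.List.pyRange 1 (n+1) 1).foldl (fun acc i =>
      (PySem.List.pyRange 1 (m+1) 1).foldl (fun acc2 j => acc2 + (49 * j ^ 4 + i ^ 2)) acc) 0
  part_a - part_b

-- ===== PORT B =====
-- len(range(1, k+1)) is the count (k+1-1).toNat; Python computes it in O(1), so the port does too (exact)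
def f13_alt (n : Int) (m : Int) : Int :=
  let N : Int := (((n + 1 - 1).toNat : Nat) : Int)
  let M : Int := (((m + 1 - 1).toNat : Nat) : Int)
  let s2 := PySem.Int.floordiv (N * (N + 1) * (2 * N + 1)) 6
  let s4 := PySem.Int.floordiv (M * (M + 1) * (2 * M + 1) * (3 * M * M + 3 * M - 1)) 30
  let s6 := PySem.Int.floordiv (N * (N + 1) * (2 * N + 1) * (3 * N ^ 4 + 6 * N ^ 3 - 3 * N + 1)) 42
  let s8 := PySem.Int.floordiv
      (N * (N + 1) * (2 * N + 1) * (5 * N ^ 6 + 15 * N ^ 5 + 5 * N ^ 4 - 15 * N ^ 3 - N * N + 9 * N - 3)) 90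
  32 * s8 + s6 - (49 * N * s4 + M * s2)

-- ===== PRECONDITION & SPEC =====
def Spec_f13 (n : Int) (m : Int) (out : Int) : Prop := out = f13_alt n m
instance (n : Int) (m : Int) (out : Int) : Decidable (Spec_f13 n m out) := by unfold Spec_f13; infer_instance

-- ===== CLAIM (what is proved, stated in full; the proofs are below) =====
def Claim_equal_f13 : Prop := ∀ (n : Int) (m : Int), Dom_f13 n m → Spec_f13 n m (f13 n m)

-- ===== LEMMAS AND PROOFS =====

-- the range of an Int upper bound is the range of its toNat
theorem range_toNat (n : Int) :
    PySem.List.pyRange 1 (n+1) 1 = PySem.List.pyRange 1 ((n.toNat : Int)+1) 1 := by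
  by_cases h : 0 ≤ n
  · rw [Int.toNat_of_nonneg h]
  · rw [PySem.List.pyRange_one_eq_nil (by omega),
        PySem.List.pyRange_one_eq_nil (by omega)]

theorem len_range_nat (K : Nat) :
    (((PySem.List.pyRange 1 ((K:Int)+1) 1).length : Int)) = (K:Int) := by
  rw [PySem.List.length_pyRange_one]
  norm_num

-- exact power sums over 1..K, stated multiplied through by the denominator
theorem sum_p2 (K : Nat) :
    6 * ((PySem.List.pyRange 1 ((K:Int)+1) 1).map (fun i => i ^ 2)).sum
      = (K:Int) * (K+1) * (2*K+1) := by
  induction K with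
  | zero => rw [PySem.List.pyRange_one_eq_nil (by omega)]; simp
  | succ k ih =>
    push_cast
    rw [show ((k:Int) + 1 + 1) = ((k:Int) + 1) + 1 by ring,
        PySem.List.pyRange_one_succ_right (a := 1) (b := (k:Int)+1) (by omega)]
    simp only [List.map_append, List.sum_append, List.map_cons, List.map_nil,
      List.sum_cons, List.sum_nil, mul_add]
    rw [ih]; push_cast; ring

theorem sum_p4 (K : Nat) :
    30 * ((PySem.List.pyRange 1 ((K:Int)+1) 1).map (fun i => i ^ 4)).sum
      = (K:Int) * (K+1) * (2*K+1) * (3*K*K + 3*K - 1) := by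
  induction K with
  | zero => rw [PySem.List.pyRange_one_eq_nil (by omega)]; simp
  | succ k ih =>
    push_cast
    rw [show ((k:Int) + 1 + 1) = ((k:Int) + 1) + 1 by ring,
        PySem.List.pyRange_one_succ_right (a := 1) (b := (k:Int)+1) (by omega)]
    simp only [List.map_append, List.sum_append, List.map_cons, List.map_nil,
      List.sum_cons, List.sum_nil, mul_add]
    rw [ih]; push_cast; ring

theorem sum_p6 (K : Nat) :
    42 * ((PySem.List.pyRange 1 ((K:Int)+1) 1).map (fun i => i ^ 6)).sum
      = (K:Int) * (K+1) * (2*K+1) * (3*(K:Int)^4 + 6*(K:Int)^3 - 3*K + 1) := by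
  induction K with
  | zero => rw [PySem.List.pyRange_one_eq_nil (by omega)]; simp
  | succ k ih =>
    push_cast
    rw [show ((k:Int) + 1 + 1) = ((k:Int) + 1) + 1 by ring,
        PySem.List.pyRange_one_succ_right (a := 1) (b := (k:Int)+1) (by omega)]
    simp only [List.map_append, List.sum_append, List.map_cons, List.map_nil,
      List.sum_cons, List.sum_nil, mul_add]
    rw [ih]; push_cast; ring

theorem sum_p8 (K : Nat) :
    90 * ((PySem.List.pyRange 1 ((K:Int)+1) 1).map (fun i => i ^ 8)).sum
      = (K:Int) * (K+1) * (2*K+1)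
        * (5*(K:Int)^6 + 15*(K:Int)^5 + 5*(K:Int)^4 - 15*(K:Int)^3 - (K:Int)*K + 9*K - 3) := by
  induction K with
  | zero => rw [PySem.List.pyRange_one_eq_nil (by omega)]; simp
  | succ k ih =>
    push_cast
    rw [show ((k:Int) + 1 + 1) = ((k:Int) + 1) + 1 by ring,
        PySem.List.pyRange_one_succ_right (a := 1) (b := (k:Int)+1) (by omega)]
    simp only [List.map_append, List.sum_append, List.map_cons, List.map_nil,
      List.sum_cons, List.sum_nil, mul_add]
    rw [ih]; push_cast; ring

-- floordiv of an exact multiple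
theorem floordiv_exact (d s p : Int) (hd : 0 < d) (h : d * s = p) :
    PySem.Int.floordiv p d = s := by
  rw [PySem.Int.floordiv_eq_ediv_of_pos hd, ← h, Int.mul_ediv_cancel_left s (by omega)]

-- A's inner sum over j equals 49*Σ j^4 plus (number of j's)·i²
theorem inner_sum_eq (l : List Int) (i : Int) :
    (l.map (fun j => 49 * j ^ 4 + i ^ 2)).sum
      = 49 * (l.map (fun j => j ^ 4)).sum + ((l.length : Int)) * i ^ 2 := by
  induction l with
  | nil => simp
  | cons x xs ih => simp [ih]; ring

-- a sum of an affine image: constant term times the length plus the scaled power sum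
theorem sum_affine (l : List Int) (c d : Int) :
    (l.map (fun i => c + d * i ^ 2)).sum
      = ((l.length : Int)) * c + d * (l.map (fun i => i ^ 2)).sum := by
  induction l with
  | nil => simp
  | cons x xs ih => simp [ih]; ring

theorem sum_comb (l : List Int) :
    (l.map (fun i => 32 * i ^ 8 + i ^ 6)).sum
      = 32 * (l.map (fun i => i ^ 8)).sum + (l.map (fun i => i ^ 6)).sum := by
  induction l with
  | nil => simp
  | cons x xs ih => simp [ih]; ring

-- ===== VERDICT (by name: the statement is the Claim_ definition above) =====
theorem f13_spec : Claim_equal_f13 := by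
  intro n m _
  show f13 n m = f13_alt n m
  unfold f13 f13_alt
  rw [range_toNat n, range_toNat m]
  simp only [PySem.List.foldl_add, zero_add, add_sub_cancel_right]
  rw [floordiv_exact 6 _ _ (by norm_num) (sum_p2 n.toNat),
      floordiv_exact 30 _ _ (by norm_num) (sum_p4 m.toNat),
      floordiv_exact 42 _ _ (by norm_num) (sum_p6 n.toNat),
      floordiv_exact 90 _ _ (by norm_num) (sum_p8 n.toNat)]
  have hin : (fun x : Int =>
        ((PySem.List.pyRange 1 ((m.toNat:Int)+1) 1).map (fun j => 49 * j ^ 4 + x ^ 2)).sum)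
      = (fun x : Int =>
        49 * ((PySem.List.pyRange 1 ((m.toNat:Int)+1) 1).map (fun j => j ^ 4)).sum
          + (m.toNat : Int) * x ^ 2) := by
    funext x
    rw [inner_sum_eq, len_range_nat]
  rw [hin, sum_affine, sum_comb, len_range_nat]
  ring
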